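-- pv_equiv track=rewrite | github.com/verailina/vvalgo | src/vvalgo/two_sum.py | count_sum_pairs
-- ===== SOURCE A (Python) =====
-- from typing import Sequence
--
-- def count_sum_pairs(
--         numbers: Sequence[int], lower_bound: int, upper_bound: int) -> int:
--     numbers = set(numbers)
--     count = 0
--     for target in range(lower_bound, upper_bound + 1):
--         for x in numbers:
--             y = target - x
--             if x != y and y in numbers:
--                 count += 1
--                 break
--
--     return count
-- ===== SOURCE B (Python) =====
-- def count_sum_pairs(numbers, lower_bound, upper_bound):
--     v = sorted(set(numbers))
--
--     def has_pair(t):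
--         i, j = 0, len(v) - 1
--         while i < j:
--             s = v[i] + v[j]
--             if s == t:
--                 return True
--             if s < t:
--                 i += 1
--             else:
--                 j -= 1
--         return False
--
--     return sum(1 for t in range(lower_bound, upper_bound + 1) if has_pair(t))
-- ===== Notes on version B (the rewrite author's own statement) =====
-- stated objective: alternative
-- what changed: Instead of scanning the whole hash set for a complement (with break) for every target, B sorts the distinct values once and decides each target with a classic two-pointer sweep over the sorted list.
import Mathlib
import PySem

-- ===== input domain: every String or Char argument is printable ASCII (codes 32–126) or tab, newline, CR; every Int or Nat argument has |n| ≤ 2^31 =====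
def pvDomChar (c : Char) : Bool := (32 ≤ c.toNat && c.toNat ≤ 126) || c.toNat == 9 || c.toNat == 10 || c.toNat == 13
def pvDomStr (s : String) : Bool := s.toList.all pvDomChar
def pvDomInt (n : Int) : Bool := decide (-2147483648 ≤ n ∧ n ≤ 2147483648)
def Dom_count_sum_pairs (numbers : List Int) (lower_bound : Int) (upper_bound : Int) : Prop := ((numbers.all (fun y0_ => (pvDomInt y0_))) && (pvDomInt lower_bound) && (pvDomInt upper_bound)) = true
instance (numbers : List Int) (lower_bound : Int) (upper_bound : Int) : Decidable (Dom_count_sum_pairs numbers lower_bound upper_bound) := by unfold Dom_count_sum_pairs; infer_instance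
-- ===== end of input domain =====

-- B decides each target with a two-pointer sweep over the sorted distinct values
-- instead of A's hash-set complement scan with break (objective: alternative).

-- ===== PORT A =====
-- the inner 'for x in numbers: … break' loop: returns 1 on the first qualifying x, else 0
def cspInner (s : PySem.Set Int) (target : Int) : List Int → Int
  | [] => 0
  | x :: rest =>
      let y := target - x
      if x ≠ y ∧ y ∈ s then 1 else cspInner s target rest

def count_sum_pairs (numbers : List Int) (lower_bound : Int) (upper_bound : Int) : Int :=
  let s : PySem.Set Int := PySem.Set.ofList numbers
  (PySem.List.pyRange lower_bound (upper_bound + 1) 1).foldl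
    (fun count target => count + cspInner s target s) 0

-- ===== PORT B =====
-- the 'while i < j' two-pointer loop of has_pair (v[i], v[j] via getD; i < j ∧ j < v.length
-- guards the indexing, which the Python loop guarantees by construction)
def cspTwoPtr (v : List Int) (t : Int) (i j : Nat) : Bool :=
  if h : i < j ∧ j < v.length then
    if v.getD i 0 + v.getD j 0 = t then true
    else if v.getD i 0 + v.getD j 0 < t then cspTwoPtr v t (i + 1) j
    else cspTwoPtr v t i (j - 1)
  else false
termination_by j - i
decreasing_by all_goals omega

def count_sum_pairs_alt (numbers : List Int) (lower_bound : Int) (upper_bound : Int) : Int :=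
  let v : List Int := PySem.List.sorted (PySem.Set.ofList numbers) (fun x => x) false
  (PySem.List.pyRange lower_bound (upper_bound + 1) 1).foldl
    (fun c t => if cspTwoPtr v t 0 (v.length - 1) then c + 1 else c) 0

-- ===== PRECONDITION & SPEC =====
def Spec_count_sum_pairs (numbers : List Int) (lower_bound : Int) (upper_bound : Int) (out : Int) : Prop := out = count_sum_pairs_alt numbers lower_bound upper_bound
instance (numbers : List Int) (lower_bound : Int) (upper_bound : Int) (out : Int) : Decidable (Spec_count_sum_pairs numbers lower_bound upper_bound out) := by unfold Spec_count_sum_pairs; infer_instance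

-- ===== CLAIM (what is proved, stated in full; the proofs are below) =====
def Claim_equal_count_sum_pairs : Prop := ∀ (numbers : List Int) (lower_bound : Int) (upper_bound : Int), Dom_count_sum_pairs numbers lower_bound upper_bound → Spec_count_sum_pairs numbers lower_bound upper_bound (count_sum_pairs numbers lower_bound upper_bound)

-- ===== LEMMAS AND PROOFS =====

-- "some element of s makes target expressible": what A's inner loop detects
def cspHit (s : PySem.Set Int) (t : Int) : Bool :=
  s.any (fun x => decide (x ≠ t - x ∧ (t - x) ∈ s))

lemma cspHit_eq_true (s : PySem.Set Int) (t : Int) :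
    cspHit s t = true ↔ ∃ x ∈ s, x ≠ t - x ∧ (t - x) ∈ s := by
  simp [cspHit]

lemma cspInner_eq (s : PySem.Set Int) (t : Int) (l : List Int) :
    cspInner s t l = if ∃ x ∈ l, x ≠ t - x ∧ (t - x) ∈ s then 1 else 0 := by
  induction l with
  | nil => simp [cspInner]
  | cons x rest ih =>
      simp only [cspInner, ih]
      by_cases hx : x ≠ t - x ∧ (t - x) ∈ s
      · rw [if_pos hx, if_pos ⟨x, List.mem_cons_self, hx⟩]
      · rw [if_neg hx]
        by_cases hr : ∃ z ∈ rest, z ≠ t - z ∧ (t - z) ∈ s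
        · rcases hr with ⟨z, hz, h⟩
          rw [if_pos ⟨z, hz, h⟩, if_pos ⟨z, List.mem_cons_of_mem _ hz, h⟩]
        · rw [if_neg hr, if_neg]
          rintro ⟨z, hz, h⟩
          rcases List.mem_cons.mp hz with rfl | hz
          · exact hx h
          · exact hr ⟨z, hz, h⟩

lemma foldl_cspInner (s : PySem.Set Int) (l : List Int) (c : Int) :
    l.foldl (fun c t => c + cspInner s t s) c
      = c + ((l.filter (fun t => cspHit s t)).length : Int) := by
  induction l generalizing c with
  | nil => simp
  | cons t rest ih =>
      simp only [List.foldl_cons, ih, List.filter_cons]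
      rw [cspInner_eq]
      by_cases h : ∃ x ∈ s, x ≠ t - x ∧ (t - x) ∈ s
      · have hb : cspHit s t = true := (cspHit_eq_true s t).mpr h
        simp [h, hb]
        ring
      · have hb : ¬ (cspHit s t = true) := fun hh => h ((cspHit_eq_true s t).mp hh)
        simp [h, hb]

lemma foldl_boolCount (p : Int → Bool) (l : List Int) (c : Int) :
    l.foldl (fun c t => if p t then c + 1 else c) c
      = c + ((l.filter p).length : Int) := by
  induction l generalizing c with
  | nil => simp
  | cons t rest ih =>
      simp only [List.foldl_cons, ih, List.filter_cons]
      by_cases h : p t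
      · simp [h]; ring
      · simp [h]

-- what the two-pointer sweep over [i, j] decides, on a strictly increasing list
lemma cspTwoPtr_iff (v : List Int) (hv : v.Pairwise (· < ·)) (t : Int) :
    ∀ (n i j : Nat), j - i = n → j < v.length →
      (cspTwoPtr v t i j = true ↔
        ∃ p q : Nat, i ≤ p ∧ p < q ∧ q ≤ j ∧ v.getD p 0 + v.getD q 0 = t) := by
  intro n
  induction n using Nat.strong_induction_on with
  | _ n ihn =>
    intro i j hn hj
    rw [cspTwoPtr]
    by_cases hij : i < j
    · rw [dif_pos ⟨hij, hj⟩]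
      have hmono : ∀ p q : Nat, p < q → q < v.length → v.getD p 0 < v.getD q 0 := by
        intro p q hpq hq
        have hp : p < v.length := by omega
        rw [List.getD_eq_getElem v 0 hp, List.getD_eq_getElem v 0 hq]
        exact (List.pairwise_iff_getElem.mp hv) p q hp hq hpq
      by_cases heq : v.getD i 0 + v.getD j 0 = t
      · rw [if_pos heq]
        constructor
        · intro _
          exact ⟨i, j, le_refl i, hij, le_refl j, heq⟩
        · intro _
          rfl
      · rw [if_neg heq]
        by_cases hlt : v.getD i 0 + v.getD j 0 < t
        · rw [if_pos hlt, ihn (j - (i + 1)) (by omega) (i + 1) j rfl hj]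
          constructor
          · rintro ⟨p, q, h1, h2, h3, h4⟩
            exact ⟨p, q, by omega, h2, h3, h4⟩
          · rintro ⟨p, q, h1, h2, h3, h4⟩
            refine ⟨p, q, ?_, h2, h3, h4⟩
            rcases Nat.eq_or_lt_of_le h1 with rfl | hip
            · exfalso
              have hq : v.getD q 0 ≤ v.getD j 0 := by
                rcases Nat.eq_or_lt_of_le h3 with rfl | hq
                · exact le_refl _
                · exact le_of_lt (hmono q j hq hj)
              omega
            · omega
        · rw [if_neg hlt, ihn ((j - 1) - i) (by omega) i (j - 1) rfl (by omega)]
          constructor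
          · rintro ⟨p, q, h1, h2, h3, h4⟩
            exact ⟨p, q, h1, h2, by omega, h4⟩
          · rintro ⟨p, q, h1, h2, h3, h4⟩
            refine ⟨p, q, h1, h2, ?_, h4⟩
            rcases Nat.eq_or_lt_of_le h3 with rfl | hq
            · exfalso
              have hp : v.getD i 0 ≤ v.getD p 0 := by
                rcases Nat.eq_or_lt_of_le h1 with rfl | hp
                · exact le_refl _
                · exact le_of_lt (hmono i p hp (by omega))
              omega
            · omega
    · rw [dif_neg (by omega)]
      simp only [Bool.false_eq_true, false_iff]
      rintro ⟨p, q, h1, h2, h3, _⟩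
      omega

-- the two-pointer verdict on sorted(set(numbers)) is exactly A's inner-loop verdict
lemma cspTwoPtr_eq_hit (numbers : List Int) (t : Int) :
    cspTwoPtr (PySem.List.sorted (PySem.Set.ofList numbers) (fun x => x) false) t 0
      ((PySem.List.sorted (PySem.Set.ofList numbers) (fun x => x) false).length - 1)
      = cspHit (PySem.Set.ofList numbers) t := by
  set v := PySem.List.sorted (PySem.Set.ofList numbers) (fun x => x) false with hvdef
  have hv : v.Pairwise (· < ·) := PySem.List.sorted_ofList_pairwise_lt numbers
  have hmem : ∀ x : Int, x ∈ v ↔ x ∈ PySem.Set.ofList numbers := by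
    intro x; rw [hvdef, PySem.List.mem_sorted]
  rcases Nat.eq_zero_or_pos v.length with hlen | hlen
  · -- empty: both sides false
    rw [cspTwoPtr, dif_neg (by omega)]
    symm
    rw [Bool.eq_false_iff]
    intro hh
    rcases (cspHit_eq_true _ t).mp hh with ⟨x, hx, _⟩
    rw [← hmem] at hx
    have := List.length_pos_of_mem hx
    omega
  · rw [Bool.eq_iff_iff,
        cspTwoPtr_iff v hv t (v.length - 1 - 0) 0 (v.length - 1) rfl (by omega),
        cspHit_eq_true]
    constructor
    · rintro ⟨p, q, _, hpq, hqj, hsum⟩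
      have hq : q < v.length := by omega
      have hp : p < v.length := by omega
      refine ⟨v[p], (hmem _).mp (List.getElem_mem hp), ?_, ?_⟩
      · have := (List.pairwise_iff_getElem.mp hv) p q hp hq hpq
        rw [List.getD_eq_getElem v 0 hp, List.getD_eq_getElem v 0 hq] at hsum
        omega
      · have hz : t - v[p] = v[q] := by
          rw [List.getD_eq_getElem v 0 hp, List.getD_eq_getElem v 0 hq] at hsum
          omega
        rw [hz]
        exact (hmem _).mp (List.getElem_mem hq)
    · rintro ⟨x, hx, hne, hy⟩
      rw [← hmem] at hx hy
      rcases List.mem_iff_getElem.mp hx with ⟨p, hp, hxp⟩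
      rcases List.mem_iff_getElem.mp hy with ⟨q, hq, hyq⟩
      have hgm := List.pairwise_iff_getElem.mp hv
      rcases lt_trichotomy x (t - x) with hlt | heq | hgt
      · have hpq : p < q := by
          by_contra hle
          rcases Nat.eq_or_lt_of_le (Nat.le_of_not_lt hle) with rfl | hqp
          · rw [hxp] at hyq; omega
          · have := hgm q p hq hp hqp
            rw [hxp, hyq] at this; omega
        exact ⟨p, q, Nat.zero_le p, hpq, by omega,
          by rw [List.getD_eq_getElem v 0 hp, List.getD_eq_getElem v 0 hq, hxp, hyq]; ring⟩
      · omega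
      · have hqp : q < p := by
          by_contra hle
          rcases Nat.eq_or_lt_of_le (Nat.le_of_not_lt hle) with rfl | hpq
          · rw [hxp] at hyq; omega
          · have := hgm p q hp hq hpq
            rw [hxp, hyq] at this; omega
        exact ⟨q, p, Nat.zero_le q, hqp, by omega,
          by rw [List.getD_eq_getElem v 0 hp, List.getD_eq_getElem v 0 hq, hxp, hyq]; ring⟩

-- ===== VERDICT (by name: the statement is the Claim_ definition above) =====
theorem count_sum_pairs_spec : Claim_equal_count_sum_pairs := by
  intro numbers lo hi _
  unfold Spec_count_sum_pairs count_sum_pairs count_sum_pairs_alt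
  rw [foldl_cspInner, foldl_boolCount]
  simp only [zero_add]
  congr 1
  refine congrArg List.length ?_
  apply List.filter_congr
  intro t _
  exact (cspTwoPtr_eq_hit numbers t).symm
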